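-- pv_equiv track=rewrite | github.com/Rautabout/Mat_tlumacz | Python/DocToTree.py | modifyNegativePhrases
-- ===== SOURCE A (Python) =====
-- def modifyNegativePhrases(input):
--     output=''
--     IndexOfNextStart=0
--
--     for i in range(len(input)):
--         if input[i]=="-":
--             if i-1==-1 or input[i-1]=="(" or input[i-1]=="{":
--                 output+=input[IndexOfNextStart:i]+'[minus]'
--                 IndexOfNextStart = i+1
--
--     if IndexOfNextStart< len(input):
--         output += input[IndexOfNextStart:]
--
--     return output
-- ===== SOURCE B (Python) =====
-- def modifyNegativePhrases(input):
--     # One forward scan with lookahead: emit chars directly, consuming a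
--     # "delimiter + '-'" pair (or a leading '-') as one unit; no slice
--     # accumulator or flush index is maintained.
--     chars = list(input)
--     n = len(chars)
--     out = []
--     j = 0
--     if n and chars[0] == '-':
--         out.append('[minus]')
--         j = 1
--     while j < n:
--         c = chars[j]
--         out.append(c)
--         if c in '({' and j + 1 < n and chars[j + 1] == '-':
--             out.append('[minus]')
--             j += 2
--         else:
--             j += 1
--     return ''.join(out)
-- ===== Notes on version B (the rewrite author's own statement) =====
-- stated objective: simpler
-- what changed: Replaces A's index loop (backward look at input[i-1] plus a flush-index and slice concatenations) with a single forward scan that looks one character ahead and consumes each delimiter+'-' pair (or a leading '-') as a unit, emitting characters directly into the output.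
import Mathlib
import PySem

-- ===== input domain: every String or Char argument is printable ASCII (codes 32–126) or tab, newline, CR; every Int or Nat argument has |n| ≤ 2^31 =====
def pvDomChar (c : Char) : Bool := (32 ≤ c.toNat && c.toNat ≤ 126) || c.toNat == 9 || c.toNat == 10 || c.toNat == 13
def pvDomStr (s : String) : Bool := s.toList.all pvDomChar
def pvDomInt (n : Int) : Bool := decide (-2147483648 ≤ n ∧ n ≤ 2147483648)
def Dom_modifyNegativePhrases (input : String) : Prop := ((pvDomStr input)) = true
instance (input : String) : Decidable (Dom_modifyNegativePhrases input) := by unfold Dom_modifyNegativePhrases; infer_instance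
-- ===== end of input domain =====

-- B replaces A's index loop (backward look + slice flushes) by a single forward
-- lookahead scan that consumes "delimiter + '-'" pairs; objective: simpler, same cost.

-- ===== PORT A =====
-- one loop iteration of A: the body of `for i in range(len(input))`
def stepA (s : List Char) (st : List Char × Int) (i : Int) : List Char × Int :=
  if PySem.List.pyGet? s i = some '-' then
    if i - 1 = -1 ∨ PySem.List.pyGet? s (i - 1) = some '(' ∨ PySem.List.pyGet? s (i - 1) = some '{' then
      (st.1 ++ PySem.List.slice s (some st.2) (some i) ++ "[minus]".toList, i + 1)
    else st
  else st

def modifyNegativePhrases (input : String) : String :=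
  let s := input.toList
  let st := (PySem.List.pyRange 0 (s.length : Int) 1).foldl (stepA s) ([], 0)
  let out := if st.2 < (s.length : Int) then st.1 ++ PySem.List.slice s (some st.2) none else st.1
  String.mk out

-- ===== PORT B =====
-- forward scan with one-character lookahead, consuming delimiter+'-' pairs
def altGo : List Char → List Char
  | [] => []
  | c :: '-' :: rest =>
      if c = '(' ∨ c = '{' then c :: ("[minus]".toList ++ altGo rest)
      else c :: altGo ('-' :: rest)
  | c :: rest => c :: altGo rest

def modifyNegativePhrases_alt (input : String) : String :=
  let l := input.toList
  if l.head? = some '-' then String.mk ("[minus]".toList ++ altGo l.tail)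
  else String.mk (altGo l)

-- ===== PRECONDITION & SPEC =====
def Spec_modifyNegativePhrases (input : String) (out : String) : Prop := out = modifyNegativePhrases_alt input
instance (input : String) (out : String) : Decidable (Spec_modifyNegativePhrases input out) := by unfold Spec_modifyNegativePhrases; infer_instance

-- ===== CLAIM (what is proved, stated in full; the proofs are below) =====
def Claim_equal_modifyNegativePhrases : Prop := ∀ (input : String), Dom_modifyNegativePhrases input → Spec_modifyNegativePhrases input (modifyNegativePhrases input)

-- ===== LEMMAS AND PROOFS =====

-- common characterisation: scan with a flag "a '-' here would be replaced"
def specGo : Bool → List Char → List Char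
  | _, [] => []
  | d, c :: rest =>
      if d = true ∧ c = '-' then "[minus]".toList ++ specGo false rest
      else c :: specGo (decide (c = '(' ∨ c = '{')) rest

def prevDelim (s : List Char) (i : Nat) : Bool :=
  decide (i = 0) || decide (s[i-1]? = some '(') || decide (s[i-1]? = some '{')

theorem altGo_eq_specGo (l : List Char) (d : Bool)
    (h : d = true → l.head? ≠ some '-') : altGo l = specGo d l := by
  induction l using altGo.induct generalizing d with
  | case1 => simp [altGo, specGo]
  | case2 c rest hdel ih =>
      have hc : ¬ (d = true ∧ c = '-') := by
        rintro ⟨hd, rfl⟩; rcases hdel with h' | h' <;> simp at h'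
      rw [altGo, if_pos hdel, specGo, if_neg hc]
      have : decide (c = '(' ∨ c = '{') = true := by simpa using hdel
      rw [this, specGo, if_pos (by simp)]
      simp [ih false (by simp)]
  | case3 c rest hdel ih =>
      have hc : ¬ (d = true ∧ c = '-') := by
        rintro ⟨hd, rfl⟩; exact (h hd) rfl
      rw [altGo, if_neg hdel, specGo, if_neg hc]
      have hd2 : decide (c = '(' ∨ c = '{') = false := by simpa using hdel
      rw [hd2]
      exact congrArg (c :: ·) (ih false (by simp))
  | case4 c rest hne ih =>
      have hc : ¬ (d = true ∧ c = '-') := by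
        rintro ⟨hd, rfl⟩; exact (h hd) rfl
      rw [altGo, specGo, if_neg hc]
      · refine congrArg (c :: ·) (ih _ ?_)
        intro _ hh
        cases rest with
        | nil => simp at hh
        | cons a t =>
            have ha : a = '-' := by simpa using hh
            exact hne t (by rw [ha])
      · exact hne

theorem alt_eq_specGo (input : String) :
    modifyNegativePhrases_alt input = String.mk (specGo true input.toList) := by
  unfold modifyNegativePhrases_alt
  cases hl : input.toList with
  | nil => simp [specGo, altGo]
  | cons c rest =>
      by_cases hc : c = '-'
      · subst hc
        rw [specGo, if_pos (by simp)]
        simp [altGo_eq_specGo rest false (by simp)]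
      · rw [if_neg (by simpa using hc)]
        rw [altGo_eq_specGo (c :: rest) true (by simpa using hc)]

-- evaluating one iteration of A's loop body at an in-range index
theorem stepA_eval (s : List Char) (st : List Char × Int) (i : Nat) (hi : i < s.length) :
    stepA s st (i : Int) =
      if s[i] = '-' ∧ prevDelim s i = true then
        (st.1 ++ PySem.List.slice s (some st.2) (some (i : Int)) ++ "[minus]".toList, (i : Int) + 1)
      else st := by
  have hget : PySem.List.pyGet? s (i : Int) = some s[i] := by
    rw [PySem.List.pyGet?_natCast, List.getElem?_eq_getElem hi]
  have hcond : ((i : Int) - 1 = -1 ∨ PySem.List.pyGet? s ((i : Int) - 1) = some '('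
      ∨ PySem.List.pyGet? s ((i : Int) - 1) = some '{') ↔ prevDelim s i = true := by
    unfold prevDelim
    rcases Nat.eq_zero_or_pos i with h0 | hpos
    · subst h0; simp
    · have hcast : (i : Int) - 1 = ((i - 1 : Nat) : Int) := by omega
      rw [hcast, PySem.List.pyGet?_natCast]
      have hne2 : ¬ (((i - 1 : Nat) : Int) = -1) := by omega
      simp [hne2, show i ≠ 0 by omega]
  unfold stepA
  rw [hget]
  by_cases hd : s[i] = '-'
  · rw [if_pos (by rw [hd])]
    by_cases hp : prevDelim s i = true
    · rw [if_pos (hcond.mpr hp), if_pos ⟨hd, hp⟩]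
    · rw [if_neg (fun h => hp (hcond.mp h)), if_neg (fun h => hp h.2)]
  · rw [if_neg (by simp [hd]), if_neg (fun h => hd h.1)]

theorem prevDelim_succ (s : List Char) (i : Nat) (hi : i < s.length) :
    prevDelim s (i + 1) = decide (s[i] = '(' ∨ s[i] = '{') := by
  unfold prevDelim
  simp only [Nat.add_sub_cancel, List.getElem?_eq_getElem hi]
  by_cases h1 : s[i] = '(' <;> by_cases h2 : s[i] = '{' <;> simp [h1, h2]

-- the main loop invariant for A
theorem loopA (s : List Char) (i next : Nat) (out : List Char)
    (h1 : next ≤ i) (h2 : i ≤ s.length) :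
    (if ((PySem.List.pyRange (i : Int) (s.length : Int) 1).foldl (stepA s) (out, (next : Int))).2 < (s.length : Int)
      then ((PySem.List.pyRange (i : Int) (s.length : Int) 1).foldl (stepA s) (out, (next : Int))).1
            ++ PySem.List.slice s (some ((PySem.List.pyRange (i : Int) (s.length : Int) 1).foldl (stepA s) (out, (next : Int))).2) none
      else ((PySem.List.pyRange (i : Int) (s.length : Int) 1).foldl (stepA s) (out, (next : Int))).1)
    = out ++ (s.drop next).take (i - next) ++ specGo (prevDelim s i) (s.drop i) := by
  induction hk : s.length - i generalizing i next out with
  | zero =>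
      have hi : i = s.length := by omega
      subst hi
      rw [PySem.List.pyRange_one_eq_nil (le_refl _)]
      simp only [List.foldl_nil]
      have hdrop : s.drop s.length = [] := List.drop_of_length_le (le_refl _)
      have htake : (s.drop next).take (s.length - next) = s.drop next := by
        apply List.take_of_length_le; simp
      rw [hdrop, htake]
      by_cases hlt : next < s.length
      · rw [if_pos (by exact_mod_cast hlt), PySem.List.slice_from_natCast]
        simp [specGo]
      · have : next = s.length := by omega
        subst this
        rw [if_neg (by omega)]
        simp [specGo]
  | succ k ih =>
      have hi : i < s.length := by omega
      rw [PySem.List.pyRange_one_cons (by exact_mod_cast hi)]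
      simp only [List.foldl_cons]
      rw [stepA_eval s _ i hi]
      have hdropi : s.drop i = s[i] :: s.drop (i + 1) :=
        (List.getElem_cons_drop hi).symm
      by_cases hrep : s[i] = '-' ∧ prevDelim s i = true
      · rw [if_pos hrep]
        have hcast : (i : Int) + 1 = ((i + 1 : Nat) : Int) := by omega
        rw [hcast]
        rw [ih (i + 1) (i + 1)
          (out ++ PySem.List.slice s (some (next : Int)) (some (i : Int)) ++ "[minus]".toList)
          (le_refl _) (by omega) (by omega)]
        rw [PySem.List.slice_natCast]
        have hpd : prevDelim s (i + 1) = false := by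
          rw [prevDelim_succ s i hi, hrep.1]; decide
        rw [hpd, hdropi, specGo, if_pos ⟨hrep.2, hrep.1⟩]
        simp
      · rw [if_neg hrep]
        rw [show (i : Int) + 1 = ((i + 1 : Nat) : Int) from by omega]
        rw [ih (i + 1) next out (by omega) (by omega) (by omega)]
        have htake : (s.drop next).take (i + 1 - next)
            = (s.drop next).take (i - next) ++ [s[i]] := by
          have e1 : i + 1 - next = (i - next) + 1 := by omega
          have e2 : next + (i - next) = i := by omega
          rw [e1, List.take_succ, List.getElem?_drop, e2, List.getElem?_eq_getElem hi]
          rfl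
        rw [htake, hdropi, specGo,
            if_neg (fun h => hrep ⟨h.2, h.1⟩),
            prevDelim_succ s i hi]
        simp


theorem modifyNegativePhrases_eq_specGo (input : String) :
    modifyNegativePhrases input = String.mk (specGo true input.toList) := by
  have h := loopA input.toList 0 0 [] (le_refl 0) (Nat.zero_le _)
  simp [prevDelim] at h
  exact congrArg String.mk h

-- ===== VERDICT (by name: the statement is the Claim_ definition above) =====
theorem modifyNegativePhrases_spec : Claim_equal_modifyNegativePhrases := by
  intro input _
  unfold Spec_modifyNegativePhrases
  rw [modifyNegativePhrases_eq_specGo, alt_eq_specGo]
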